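-- pv_equiv track=rewrite | github.com/pypi-data/pypi-mirror-398 | packages/agex/agex-0.7.1.tar.gz/agex-0.7.1/agex/agent/formatting.py | format_context_as_markdown
-- ===== SOURCE A (Python) =====
-- def format_context_as_markdown(context: str) -> str:
--     """
--     Format plain Python context content as markdown for LLM consumption.
--
--     Takes the output from ContextRenderer (plain Python) and wraps it in
--     appropriate markdown formatting with code blocks and headers.
--
--     Args:
--         context: Plain text context from ContextRenderer
--
--     Returns:
--         Markdown-formatted string suitable for LLM system messages
--     """
--     if not context.strip():
--         return ""
--
--     lines = context.split("\n")
--     sections = []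
--     current_section = []
--     current_header = None
--
--     for line in lines:
--         # Detect section headers (like "Agent stdout:")
--         if line.endswith(":") and not line.startswith(" ") and "=" not in line:
--             # Save previous section if exists
--             if current_section:
--                 if current_header:
--                     sections.append(_format_section(current_header, current_section))
--                 else:
--                     # No previous header, treat as state changes
--                     sections.append(_format_section("State Changes", current_section))
--
--             # Start new section
--             current_header = line[:-1]  # Remove trailing colon
--             current_section = []
--         else:
--             current_section.append(line)
--
--     # Add final section
--     if current_section:
--         if current_header:
--             sections.append(_format_section(current_header, current_section))
--         else:
--             # No header found, treat as state changes
--             sections.append(_format_section("State Changes", current_section))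
--
--     return "\n\n".join(sections)
--
-- def _format_section(header: str, lines: list[str]) -> str:
--     """Format a section with header and Python code block."""
--     # Clean up header formatting
--     if header == "Agent stdout":
--         header = "## Stdout (prints and errors)..."
--     elif "=" in "".join(lines):  # Likely state changes
--         header = "## State Changes"
--     else:
--         header = f"## {header}"
--
--     # Clean up content - remove quotes from printed strings
--     cleaned_lines = []
--     for line in lines:
--         line = line.strip()
--         if not line:
--             continue
--
--         # Remove quotes around printed strings (but keep them for state assignments)
--         if "=" not in line and line.startswith("'") and line.endswith("'"):
--             line = line[1:-1]  # Remove surrounding quotes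
--         elif "=" not in line and line.startswith('"') and line.endswith('"'):
--             line = line[1:-1]  # Remove surrounding quotes
--
--         cleaned_lines.append(line)
--
--     if not cleaned_lines:
--         return ""
--
--     # Format as markdown with Python code block
--     content = "\n".join(cleaned_lines)
--     return f"{header}\n\n```python\n{content}\n```"
-- ===== SOURCE B (Python) =====
-- def _format_section(header: str, lines: list[str]) -> str:
--     """Format a section with header and Python code block."""
--     # Clean up header formatting
--     if header == "Agent stdout":
--         header = "## Stdout (prints and errors)..."
--     elif "=" in "".join(lines):  # Likely state changes
--         header = "## State Changes"
--     else:
--         header = f"## {header}"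
--
--     # Clean up content - remove quotes from printed strings
--     cleaned_lines = []
--     for line in lines:
--         line = line.strip()
--         if not line:
--             continue
--         if "=" not in line and line.startswith("'") and line.endswith("'"):
--             line = line[1:-1]
--         elif "=" not in line and line.startswith('"') and line.endswith('"'):
--             line = line[1:-1]
--         cleaned_lines.append(line)
--
--     if not cleaned_lines:
--         return ""
--
--     content = "\n".join(cleaned_lines)
--     return f"{header}\n\n```python\n{content}\n```"
--
--
-- def _is_header(line: str) -> bool:
--     return line.endswith(":") and not line.startswith(" ") and "=" not in line
--
--
-- def _split_sections(header, lines):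
--     """Recursively slice `lines` at the first header line into
--     (header-or-None, segment) pairs."""
--     for i, line in enumerate(lines):
--         if _is_header(line):
--             return [(header, lines[:i])] + _split_sections(line[:-1], lines[i + 1:])
--     return [(header, lines)]
--
--
-- def format_context_as_markdown(context: str) -> str:
--     if not context.strip():
--         return ""
--     pairs = _split_sections(None, context.split("\n"))
--     return "\n\n".join(
--         _format_section(h or "State Changes", seg)
--         for h, seg in pairs
--         if seg
--     )
-- ===== Notes on version B (the rewrite author's own statement) =====
-- stated objective: alternative
-- what changed: A's single pass with mutable (sections, current_section, current_header) accumulator state is replaced by a recursive splitter that slices the line list at each header line into (header-or-None, segment) pairs, then a filter/map/join over those pairs.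
import Mathlib
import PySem

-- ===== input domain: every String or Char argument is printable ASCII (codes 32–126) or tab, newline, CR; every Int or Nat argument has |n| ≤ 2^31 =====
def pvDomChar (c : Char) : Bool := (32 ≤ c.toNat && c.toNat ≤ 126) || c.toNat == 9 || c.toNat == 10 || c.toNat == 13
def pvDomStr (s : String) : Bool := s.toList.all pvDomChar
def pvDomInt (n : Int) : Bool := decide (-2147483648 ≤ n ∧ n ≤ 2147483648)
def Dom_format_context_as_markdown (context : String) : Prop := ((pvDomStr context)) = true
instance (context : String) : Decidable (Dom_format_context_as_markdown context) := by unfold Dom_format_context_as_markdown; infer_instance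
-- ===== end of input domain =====

-- B replaces A's single accumulator loop by a recursive split of the line list at header
-- lines into (header?, segment) pairs, then maps/filters/joins; objective: alternative decomposition.


-- ===== PORT A =====
-- _format_section, byte-identical helper of BOTH Pythons (defined once, used by both ports)
def pvFormatSection (header : String) (lines : List String) : String :=
  let header :=
    if header = "Agent stdout" then "## Stdout (prints and errors)..."
    else if PySem.Str.isIn "=" (PySem.Str.join "" lines) then "## State Changes"
    else PySem.Str.join "" ["## ", header]
  let cleaned := lines.foldl (fun acc line =>
    let line := PySem.Str.strip line
    if line = "" then acc
    else
      let line :=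
        if !PySem.Str.isIn "=" line && PySem.Str.startswith line "'" && PySem.Str.endswith line "'" then
          PySem.Str.slice line (some 1) (some (-1))
        else if !PySem.Str.isIn "=" line && PySem.Str.startswith line "\"" && PySem.Str.endswith line "\"" then
          PySem.Str.slice line (some 1) (some (-1))
        else line
      acc ++ [line]) []
  if cleaned = [] then ""
  else PySem.Str.join "" [header, "\n\n```python\n", PySem.Str.join "\n" cleaned, "\n```"]

-- the header test (inline in A's loop; helper _is_header in B) — same condition, defined once
def pvIsHeader (line : String) : Bool :=
  PySem.Str.endswith line ":" && !PySem.Str.startswith line " " && !PySem.Str.isIn "=" line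

-- Python truthiness of current_header (None and "" are falsy)
def pvTruthy : Option String → Bool
  | none => false
  | some s => s ≠ ""

-- 'if current_header: _format_section(current_header, sec) else _format_section("State Changes", sec)'
def pvEmitA (hdr : Option String) (cur : List String) : String :=
  if pvTruthy hdr then pvFormatSection (hdr.getD "") cur else pvFormatSection "State Changes" cur

-- one iteration of A's for-loop; state = (sections, current_section, current_header)
def pvStepA (st : List String × List String × Option String) (line : String) :
    List String × List String × Option String :=
  let (sections, cur, hdr) := st
  if pvIsHeader line then
    ((if cur ≠ [] then sections ++ [pvEmitA hdr cur] else sections), [],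
      some (PySem.Str.slice line none (some (-1))))
  else (sections, cur ++ [line], hdr)

-- A's trailing 'if current_section: sections.append(...)'
def pvFinalA (st : List String × List String × Option String) : List String :=
  if st.2.1 ≠ [] then st.1 ++ [pvEmitA st.2.2 st.2.1] else st.1

def format_context_as_markdown (context : String) : String :=
  if PySem.Str.strip context = "" then ""
  else
    let lines := (PySem.Str.split? context "\n").getD []
    PySem.Str.join "\n\n" (pvFinalA (lines.foldl pvStepA ([], [], none)))

-- ===== PORT B =====
-- 'h or "State Changes"'
def pvHdrOr : Option String → String
  | none => "State Changes"
  | some s => if s = "" then "State Changes" else s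

-- _split_sections: slice `lines` at the first header line (prefix before it, rest after it), recurse
def pvSplitSections (hdr : Option String) (lines : List String) :
    List (Option String × List String) :=
  match hrest : lines.dropWhile (fun l => !pvIsHeader l) with
  | [] => [(hdr, lines)]
  | l :: rest =>
      (hdr, lines.takeWhile (fun l => !pvIsHeader l)) ::
        pvSplitSections (some (PySem.Str.slice l none (some (-1)))) rest
termination_by lines.length
decreasing_by
  have h1 : (l :: rest).length ≤ lines.length := hrest ▸ List.length_dropWhile_le _ lines
  simp at h1; omega

-- the filtered generator expression, as filter-then-map
def pvRender (pairs : List (Option String × List String)) : List String :=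
  (pairs.filter (fun p => p.2 ≠ [])).map (fun p => pvFormatSection (pvHdrOr p.1) p.2)

def format_context_as_markdown_alt (context : String) : String :=
  if PySem.Str.strip context = "" then ""
  else
    let pairs := pvSplitSections none ((PySem.Str.split? context "\n").getD [])
    PySem.Str.join "\n\n" (pvRender pairs)

-- ===== PRECONDITION & SPEC =====
def Spec_format_context_as_markdown (context : String) (out : String) : Prop := out = format_context_as_markdown_alt context
instance (context : String) (out : String) : Decidable (Spec_format_context_as_markdown context out) := by unfold Spec_format_context_as_markdown; infer_instance

-- ===== CLAIM (what is proved, stated in full; the proofs are below) =====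
def Claim_equal_format_context_as_markdown : Prop := ∀ (context : String), Dom_format_context_as_markdown context → Spec_format_context_as_markdown context (format_context_as_markdown context)

-- ===== LEMMAS AND PROOFS =====

theorem pvEmitA_eq (hdr : Option String) (cur : List String) :
    pvEmitA hdr cur = pvFormatSection (pvHdrOr hdr) cur := by
  cases hdr with
  | none => rfl
  | some s =>
    by_cases h : s = "" <;> simp [pvEmitA, pvTruthy, pvHdrOr, h]

-- splitting a list whose prefix `cur` contains no header
theorem pvSplitSections_all (hdr : Option String) (cur : List String)
    (hcur : ∀ x ∈ cur, pvIsHeader x = false) :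
    pvSplitSections hdr cur = [(hdr, cur)] := by
  rw [pvSplitSections]
  have hd : cur.dropWhile (fun l => !pvIsHeader l) = [] :=
    List.dropWhile_eq_nil_iff.mpr (by intro x hx; simp [hcur x hx])
  split
  · rfl
  · simp_all

theorem pvSplitSections_break (hdr : Option String) (cur : List String) (l : String)
    (ls : List String) (hcur : ∀ x ∈ cur, pvIsHeader x = false) (hl : pvIsHeader l = true) :
    pvSplitSections hdr (cur ++ l :: ls) =
      (hdr, cur) :: pvSplitSections (some (PySem.Str.slice l none (some (-1)))) ls := by
  rw [pvSplitSections]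
  have hdc : cur.dropWhile (fun l => !pvIsHeader l) = [] :=
    List.dropWhile_eq_nil_iff.mpr (by intro x hx; simp [hcur x hx])
  have htc : cur.takeWhile (fun l => !pvIsHeader l) = cur :=
    List.takeWhile_eq_self_iff.mpr (by intro x hx; simp [hcur x hx])
  have hdrop : (cur ++ l :: ls).dropWhile (fun l => !pvIsHeader l) = l :: ls := by
    rw [List.dropWhile_append, hdc]
    simp [hl]
  have htake : (cur ++ l :: ls).takeWhile (fun l => !pvIsHeader l) = cur := by
    rw [List.takeWhile_append, htc]
    by_cases h0 : cur.length = cur.length <;> simp [hl]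
  split
  · simp_all
  · rename_i l1 rest heq
    rw [hdrop] at heq
    obtain ⟨h1, h2⟩ := List.cons.inj heq
    subst h1 h2
    rw [htake]

-- the main loop invariant: A's fold-then-finalize equals B's split-then-render
theorem loop_eq (lines : List String) : ∀ (sections cur : List String) (hdr : Option String),
    (∀ x ∈ cur, pvIsHeader x = false) →
    pvFinalA (lines.foldl pvStepA (sections, cur, hdr)) =
      sections ++ pvRender (pvSplitSections hdr (cur ++ lines)) := by
  induction lines with
  | nil =>
    intro sections cur hdr hcur
    rw [List.append_nil, pvSplitSections_all hdr cur hcur]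
    by_cases h : cur = [] <;>
      simp [pvFinalA, pvRender, h, pvEmitA_eq]
  | cons l ls ih =>
    intro sections cur hdr hcur
    by_cases hl : pvIsHeader l = true
    · rw [List.foldl_cons]
      have hstep : pvStepA (sections, cur, hdr) l =
          ((if cur ≠ [] then sections ++ [pvEmitA hdr cur] else sections), [],
            some (PySem.Str.slice l none (some (-1)))) := by
        simp [pvStepA, hl]
      rw [hstep, ih _ [] _ (by intro x hx; simp at hx)]
      rw [pvSplitSections_break hdr cur l ls hcur hl]
      by_cases h : cur = [] <;>
        simp [pvRender, h, pvEmitA_eq]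
    · rw [List.foldl_cons]
      have hl' : pvIsHeader l = false := by simpa using hl
      have hstep : pvStepA (sections, cur, hdr) l = (sections, cur ++ [l], hdr) := by
        simp [pvStepA, hl']
      rw [hstep, ih _ (cur ++ [l]) hdr (by
        intro x hx
        rcases List.mem_append.mp hx with h | h
        · exact hcur x h
        · simp at h; simpa [h] using hl')]
      simp

-- ===== VERDICT (by name: the statement is the Claim_ definition above) =====
theorem format_context_as_markdown_spec : Claim_equal_format_context_as_markdown := by
  intro context _
  unfold Spec_format_context_as_markdown format_context_as_markdown format_context_as_markdown_alt
  by_cases h : PySem.Str.strip context = ""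
  · simp [h]
  · simp only [h, if_false]
    rw [loop_eq _ [] [] none (by intro x hx; simp at hx)]
    simp
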